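-- pv_equiv track=rewrite | github.com/nalwayv/bitesofpy | bite_123/bite_123.py | get_friend_with_most_friends
-- ===== SOURCE A (Python) =====
-- from collections import defaultdict
--
-- def get_friend_with_most_friends(friendships, users):
--     """Receives the friendships list of user ID pairs,
--        parse it to see who has most friends, return a tuple
--        of (name_friend_with_most_friends, his_or_her_friends)
--     """
--     friends = defaultdict(list)
--     for u, f in friendships:
--         friend = users[f]
--         user = users[u]
--
--         friends[u].append(friend)
--         friends[f].append(user)
--
--     result = sorted([(users[n], sorted(u)) for n, u in friends.items()],
--                     key=lambda x: len(x[1]))[-1]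
--     return result
-- ===== SOURCE B (Python) =====
-- def get_friend_with_most_friends(friendships, users):
--     """Receives the friendships list of user ID pairs,
--        parse it to see who has most friends, return a tuple
--        of (name_friend_with_most_friends, his_or_her_friends)
--     """
--     friends = {}
--     for u, f in friendships:
--         friends.setdefault(u, []).append(users[f])
--         friends.setdefault(f, []).append(users[u])
--     best_id = None
--     best = None
--     for n, lst in friends.items():
--         if best is None or len(best) <= len(lst):
--             best_id, best = n, lst
--     return (users[best_id], sorted(best))
-- ===== Notes on version B (the rewrite author's own statement) =====
-- stated objective: faster
-- what changed: B keeps the adjacency-building loop but replaces A's sort of all candidates (plus sorting every user's friend list) with a single linear >=-max scan over the dict items, sorting only the winner's friend list.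
import Mathlib
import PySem

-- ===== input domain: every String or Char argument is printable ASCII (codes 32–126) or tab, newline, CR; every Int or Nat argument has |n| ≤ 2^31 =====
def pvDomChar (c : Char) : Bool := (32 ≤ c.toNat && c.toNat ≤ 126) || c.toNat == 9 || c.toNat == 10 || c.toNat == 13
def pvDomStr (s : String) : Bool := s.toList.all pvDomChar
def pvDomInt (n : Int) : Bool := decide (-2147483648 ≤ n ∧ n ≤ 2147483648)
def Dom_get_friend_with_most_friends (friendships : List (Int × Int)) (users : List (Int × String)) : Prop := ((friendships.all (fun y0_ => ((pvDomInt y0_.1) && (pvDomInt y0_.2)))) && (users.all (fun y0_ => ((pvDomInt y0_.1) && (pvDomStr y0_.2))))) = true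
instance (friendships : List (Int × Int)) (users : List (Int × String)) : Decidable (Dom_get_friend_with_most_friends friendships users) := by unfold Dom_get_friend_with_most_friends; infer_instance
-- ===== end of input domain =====

-- B replaces A's global sort-by-degree + per-user list sorts with one linear max scan,
-- sorting only the winner's friend list; same value on every input admitted by Pre_.
-- ===== PORT A =====
-- B may observe only the return value; A mutates nothing.
def get_friend_with_most_friends (friendships : List (Int × Int)) (users : List (Int × String)) : String × List String :=
  let ud := PySem.Dict.ofList users
  let friends : PySem.Dict Int (List String) := friendships.foldl (fun d p =>
    let friend := ud.getD p.2 ""            -- users[f]  (Pre_ guarantees the key exists)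
    let user := ud.getD p.1 ""              -- users[u]
    (d.modify p.1 [] (· ++ [friend])).modify p.2 [] (· ++ [user])) PySem.Dict.empty
  PySem.List.pyGetD
    (PySem.List.sorted
      (friends.items.map (fun q => (ud.getD q.1 "", PySem.List.sorted q.2 (fun s => s))))
      (fun x => x.2.length))
    (-1) ("", [])

-- ===== PORT B =====
-- friends.setdefault(u, []).append(x) mutates the stored list: exactly d.modify u [] (· ++ [x]).
def get_friend_with_most_friends_alt (friendships : List (Int × Int)) (users : List (Int × String)) : String × List String :=
  let ud := PySem.Dict.ofList users
  let friends : PySem.Dict Int (List String) := friendships.foldl (fun d p =>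
    (d.modify p.1 [] (· ++ [ud.getD p.2 ""])).modify p.2 [] (· ++ [ud.getD p.1 ""])) PySem.Dict.empty
  match friends.items with
  | [] => ("", [])                          -- unreachable under Pre_ (Python B raises here, like A)
  | it0 :: rest =>
    let best := rest.foldl (fun b q => if b.2.length ≤ q.2.length then q else b) it0
    (ud.getD best.1 "", PySem.List.sorted best.2 (fun s => s))

-- ===== PRECONDITION & SPEC =====
-- Pre_ excludes exactly the inputs where the Python A raises: an empty friendships list
-- (IndexError on [-1]) and pairs whose ids are missing from users (KeyError); B raises there too.
def Pre_get_friend_with_most_friends (friendships : List (Int × Int)) (users : List (Int × String)) : Prop :=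
  friendships ≠ [] ∧ ∀ p ∈ friendships,
    (PySem.Dict.ofList users).contains p.1 = true ∧ (PySem.Dict.ofList users).contains p.2 = true
instance (friendships : List (Int × Int)) (users : List (Int × String)) : Decidable (Pre_get_friend_with_most_friends friendships users) := by unfold Pre_get_friend_with_most_friends; infer_instance
def pvWitness_get_friend_with_most_friends : (List (Int × Int)) × (List (Int × String)) :=
  ([(1, 2)], [(1, "ann"), (2, "bob")])

def Spec_get_friend_with_most_friends (friendships : List (Int × Int)) (users : List (Int × String)) (out : String × List String) : Prop := out = get_friend_with_most_friends_alt friendships users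
instance (friendships : List (Int × Int)) (users : List (Int × String)) (out : String × List String) : Decidable (Spec_get_friend_with_most_friends friendships users out) := by unfold Spec_get_friend_with_most_friends; infer_instance

-- ===== CLAIM (what is proved, stated in full; the proofs are below) =====
def Claim_equal_get_friend_with_most_friends : Prop := ∀ (friendships : List (Int × Int)) (users : List (Int × String)), Dom_get_friend_with_most_friends friendships users → Pre_get_friend_with_most_friends friendships users → Spec_get_friend_with_most_friends friendships users (get_friend_with_most_friends friendships users)

-- ===== LEMMAS AND PROOFS =====

theorem insertBy_ne_nil {α : Type} (before : α → α → Bool) (y : α) (l : List α) :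
    PySem.List.insertBy before y l ≠ [] := by
  cases l <;> simp [PySem.List.insertBy] <;> split <;> simp

theorem getLastD_congr {α : Type} (l : List α) (d d' : α) (h : l ≠ []) :
    l.getLastD d = l.getLastD d' := by
  cases l with
  | nil => exact absurd rfl h
  | cons a t => rw [List.getLastD_cons, List.getLastD_cons]

theorem key_head_le_getLastD {α : Type} (key : α → Nat) (a : α) (l : List α) (d : α)
    (h : (a :: l).Pairwise (fun x y => key x ≤ key y)) :
    key a ≤ key ((a :: l).getLastD d) := by
  induction l generalizing a with
  | nil => simp
  | cons b t ih =>
    rw [List.pairwise_cons] at h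
    have h1 : key a ≤ key b := h.1 b (by simp)
    have := ih b h.2
    rw [List.getLastD_cons]
    rw [List.getLastD_cons] at this ⊢
    omega

theorem pairwise_insertBy {α : Type} (key : α → Nat) (y : α) (l : List α)
    (h : l.Pairwise (fun a b => key a ≤ key b)) :
    (PySem.List.insertBy (fun a b => decide (key a < key b)) y l).Pairwise
      (fun a b => key a ≤ key b) := by
  induction l with
  | nil => simp [PySem.List.insertBy]
  | cons a t ih =>
    rw [List.pairwise_cons] at h
    simp only [PySem.List.insertBy]
    split
    · rename_i hlt
      simp only [decide_eq_true_eq] at hlt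
      refine List.Pairwise.cons ?_ (List.Pairwise.cons h.1 h.2)
      intro z hz
      rw [List.mem_cons] at hz
      rcases hz with rfl | hz
      · omega
      · have := h.1 z hz; omega
    · rename_i hnlt
      simp only [decide_eq_true_eq] at hnlt
      refine List.Pairwise.cons ?_ (ih h.2)
      intro z hz
      rw [PySem.List.mem_insertBy] at hz
      rcases hz with rfl | hz
      · omega
      · exact h.1 z hz

theorem getLastD_insertBy {α : Type} (key : α → Nat) (y : α) (d : α) :
    ∀ (a : α) (l : List α), (a :: l).Pairwise (fun x z => key x ≤ key z) →
    (PySem.List.insertBy (fun x z => decide (key x < key z)) y (a :: l)).getLastD d =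
      if key ((a :: l).getLastD d) ≤ key y then y else (a :: l).getLastD d := by
  intro a l
  induction l generalizing a with
  | nil =>
    intro _
    simp only [PySem.List.insertBy]
    split
    · rename_i hlt; simp only [decide_eq_true_eq] at hlt
      simp only [List.getLastD_cons, List.getLastD_nil]
      rw [if_neg (by omega)]
    · rename_i hlt; simp only [decide_eq_true_eq] at hlt
      simp only [List.getLastD_cons, List.getLastD_nil]
      rw [if_pos (by omega)]
  | cons b t ih =>
    intro h
    simp only [PySem.List.insertBy]
    split
    · rename_i hlt; simp only [decide_eq_true_eq] at hlt
      have hle := key_head_le_getLastD key a (b :: t) d h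
      simp only [List.getLastD_cons] at hle ⊢
      rw [if_neg (by omega)]
    · rename_i hlt; simp only [decide_eq_true_eq] at hlt
      rw [List.pairwise_cons] at h
      have hrec := ih b h.2
      have hne := insertBy_ne_nil (fun x z => decide (key x < key z)) y (b :: t)
      calc (a :: PySem.List.insertBy (fun x z => decide (key x < key z)) y (b :: t)).getLastD d
          = (PySem.List.insertBy (fun x z => decide (key x < key z)) y (b :: t)).getLastD a := by
            rw [List.getLastD_cons]
        _ = (PySem.List.insertBy (fun x z => decide (key x < key z)) y (b :: t)).getLastD d := by
            exact getLastD_congr _ a d hne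
        _ = if key ((b :: t).getLastD d) ≤ key y then y else (b :: t).getLastD d := hrec
        _ = if key ((a :: b :: t).getLastD d) ≤ key y then y else (a :: b :: t).getLastD d := by
            simp [List.getLastD_cons]

theorem foldl_insertBy_getLastD {α : Type} (key : α → Nat) (d : α) :
    ∀ (l : List α) (acc : List α), acc.Pairwise (fun x z => key x ≤ key z) → acc ≠ [] →
    ((l.foldl (fun ac x => PySem.List.insertBy (fun a b => decide (key a < key b)) x ac) acc).getLastD d) =
      l.foldl (fun b y => if key b ≤ key y then y else b) (acc.getLastD d) := by
  intro l
  induction l with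
  | nil => intro acc _ _; rfl
  | cons y t ih =>
    intro acc hp hne
    cases acc with
    | nil => exact absurd rfl hne
    | cons a as =>
      simp only [List.foldl_cons]
      rw [ih _ (pairwise_insertBy key y _ hp) (insertBy_ne_nil _ y _),
          getLastD_insertBy key y d a as hp]

theorem sorted_getLastD {α : Type} (key : α → Nat) (d x : α) (l : List α) :
    (PySem.List.sorted (x :: l) (fun a => key a)).getLastD d =
      l.foldl (fun b y => if key b ≤ key y then y else b) x := by
  rw [PySem.List.sorted_eq_foldl_insertBy]
  simp only [List.foldl_cons]
  have h0 : PySem.List.insertBy (fun a b => decide (key a < key b)) x ([] : List α) = [x] := rfl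
  rw [h0, foldl_insertBy_getLastD key d l [x] (by simp) (by simp)]
  rfl

theorem pyGetD_neg_one_getLastD {α : Type} (xs : List α) (d : α) (h : xs ≠ []) :
    PySem.List.pyGetD xs (-1) d = xs.getLastD d := by
  cases xs with
  | nil => exact absurd rfl h
  | cons a t =>
    rw [PySem.List.pyGetD_neg_one _ _ h, List.getLast_eq_getLastD, List.getLastD_cons]

theorem foldl_argmax_map {α β : Type} (g : α → β) (k : β → Nat) :
    ∀ (l : List α) (x : α),
    (l.map g).foldl (fun b y => if k b ≤ k y then y else b) (g x) =
      g (l.foldl (fun b y => if k (g b) ≤ k (g y) then y else b) x) := by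
  intro l
  induction l with
  | nil => intro x; rfl
  | cons a t ih =>
    intro x
    simp only [List.map_cons, List.foldl_cons]
    split <;> rw [ih]

theorem insert_items_ne_nil {κ ν : Type} [BEq κ] [LawfulBEq κ] (d : PySem.Dict κ ν) (k : κ) (v : ν) :
    (d.insert k v).items ≠ [] := by
  rw [PySem.Dict.items_insert]
  split
  · rename_i hc
    intro he
    rw [List.map_eq_nil_iff] at he
    simp [PySem.Dict.contains, he] at hc
  · simp

theorem foldl_items_ne_nil {β κ ν : Type} [BEq κ] [LawfulBEq κ]
    (step : PySem.Dict κ ν → β → PySem.Dict κ ν)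
    (hstep : ∀ d b, (step d b).items ≠ []) :
    ∀ (l : List β) (d : PySem.Dict κ ν), d.items ≠ [] → (l.foldl step d).items ≠ [] := by
  intro l
  induction l with
  | nil => intro d h; exact h
  | cons b t ih => intro d _; exact ih (step d b) (hstep d b)

-- ===== VERDICT (by name: the statement is the Claim_ definition above) =====
theorem get_friend_with_most_friends_spec : Claim_equal_get_friend_with_most_friends := by
  intro friendships users _ hpre
  unfold Spec_get_friend_with_most_friends
  unfold get_friend_with_most_friends get_friend_with_most_friends_alt
  simp only []
  obtain ⟨hne, -⟩ := hpre
  set ud := PySem.Dict.ofList users with hud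
  set step := (fun (d : PySem.Dict Int (List String)) (p : Int × Int) =>
    (d.modify p.1 [] (· ++ [ud.getD p.2 ""])).modify p.2 [] (· ++ [ud.getD p.1 ""])) with hstep
  have hitems : (friendships.foldl step PySem.Dict.empty).items ≠ [] := by
    cases friendships with
    | nil => exact absurd rfl hne
    | cons p ps =>
      rw [List.foldl_cons]
      refine foldl_items_ne_nil step ?_ ps (step PySem.Dict.empty p) ?_
      · intro d b
        exact insert_items_ne_nil _ _ _
      · exact insert_items_ne_nil _ _ _
  cases hit : (friendships.foldl step PySem.Dict.empty).items with
  | nil => exact absurd hit hitems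
  | cons it0 rest =>
    have hsne : PySem.List.sorted
        (List.map (fun q => (ud.getD q.1 "", PySem.List.sorted q.2 fun s => s)) (it0 :: rest))
        (fun x => x.2.length) ≠ [] := by
      simp [PySem.List.sorted_eq_nil_iff]
    rw [pyGetD_neg_one_getLastD _ _ hsne, List.map_cons,
        sorted_getLastD (fun (x : String × List String) => x.2.length) ("", []) _ _,
        foldl_argmax_map (fun (q : Int × List String) => (ud.getD q.1 "", PySem.List.sorted q.2 fun s => s))
          (fun (x : String × List String) => x.2.length) rest it0]
    simp only [PySem.List.length_sorted]
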